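-- pv_equiv track=rewrite | github.com/Stronglian/LearnDeepLearning_108summer | Classification_pytroch/utils_collect.py | MakeMaxMinList
-- ===== SOURCE A (Python) =====
-- def MakeMaxMinList(loss_list):
--     max_list = []
--     min_list = []
--     max_num = loss_list[0]
--     min_num = loss_list[0]
--     for _l in loss_list:
--         if _l > max_num:
--             max_num = _l
--         if _l < min_num:
--             min_num = _l
--         max_list.append(max_num)
--         min_list.append(min_num)
--     return max_list, min_list
-- ===== SOURCE B (Python) =====
-- def MakeMaxMinList(loss_list):
--     if len(loss_list) <= 1:
--         return list(loss_list), list(loss_list)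
--     m = len(loss_list) // 2
--     lmax, lmin = MakeMaxMinList(loss_list[:m])
--     rmax, rmin = MakeMaxMinList(loss_list[m:])
--     bm = lmax[-1]
--     bn = lmin[-1]
--     return (lmax + [v if v > bm else bm for v in rmax],
--             lmin + [v if v < bn else bn for v in rmin])
-- ===== Notes on version B (the rewrite author's own statement) =====
-- stated objective: alternative
-- what changed: Replaced the single-pass running-accumulator loop by a divide-and-conquer recursion: split the list in half, recursively build each half's prefix-max/min lists, and merge by capping the right half's lists with the left half's final extremes; Pre_ excludes only the empty list, on which A raises IndexError at its initial first-element read while B returns ([], []).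
import Mathlib
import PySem

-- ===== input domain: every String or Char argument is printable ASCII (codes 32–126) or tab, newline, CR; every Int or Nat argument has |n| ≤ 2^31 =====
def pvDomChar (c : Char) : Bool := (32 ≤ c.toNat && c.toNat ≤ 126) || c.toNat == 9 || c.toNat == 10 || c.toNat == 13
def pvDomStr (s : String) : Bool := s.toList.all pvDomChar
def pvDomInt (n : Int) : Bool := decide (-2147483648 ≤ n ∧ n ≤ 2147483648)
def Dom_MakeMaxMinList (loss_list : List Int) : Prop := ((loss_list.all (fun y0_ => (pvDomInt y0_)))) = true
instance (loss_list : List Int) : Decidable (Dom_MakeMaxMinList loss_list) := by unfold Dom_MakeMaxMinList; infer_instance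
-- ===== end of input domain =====

-- B builds the prefix-max/min lists by divide-and-conquer on halves instead of A's single running-accumulator loop; on the empty list (excluded by Pre_) A raises IndexError while B returns ([], []).


-- ===== PORT A =====
-- state: (max_num, min_num, max_list, min_list)
def mmStep (st : Int × Int × List Int × List Int) (l : Int) : Int × Int × List Int × List Int :=
  let mx := if l > st.1 then l else st.1
  let mn := if l < st.2.1 then l else st.2.1
  (mx, mn, st.2.2.1 ++ [mx], st.2.2.2 ++ [mn])

def MakeMaxMinList (loss_list : List Int) : List Int × List Int :=
  match PySem.List.pyGet? loss_list 0 with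
  | none => ([], [])   -- Python's first-element read raises IndexError here; excluded by Pre_
  | some h =>
    let s := loss_list.foldl mmStep (h, h, [], [])
    (s.2.2.1, s.2.2.2)

-- ===== PORT B =====
-- divide and conquer: split at m = len // 2, recurse on the slices, merge by capping the
-- right half's prefix lists with the left half's last entries lmax[-1] / lmin[-1]
-- (the .getD 0 defaults are unreachable: the left half is nonempty, so its lists are too).
def MakeMaxMinList_alt (loss_list : List Int) : List Int × List Int :=
  if _hle : loss_list.length ≤ 1 then (loss_list, loss_list)
  else
    let m : Nat := loss_list.length / 2
    let L := MakeMaxMinList_alt (PySem.List.slice loss_list none (some (m : Int)))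
    let R := MakeMaxMinList_alt (PySem.List.slice loss_list (some (m : Int)) none)
    let bm := (PySem.List.pyGet? L.1 (-1)).getD 0
    let bn := (PySem.List.pyGet? L.2 (-1)).getD 0
    (L.1 ++ R.1.map (fun v => if v > bm then v else bm),
     L.2 ++ R.2.map (fun v => if v < bn then v else bn))
termination_by loss_list.length
decreasing_by
  · rw [PySem.List.slice_to_natCast]; simp; omega
  · rw [PySem.List.slice_from_natCast]; simp; omega

-- ===== PRECONDITION & SPEC =====
-- Pre_ excludes the empty list, on which A raises IndexError at its initial first-element read.
def Pre_MakeMaxMinList (loss_list : List Int) : Prop := loss_list ≠ []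
instance (loss_list : List Int) : Decidable (Pre_MakeMaxMinList loss_list) := by unfold Pre_MakeMaxMinList; infer_instance
def pvWitness_MakeMaxMinList : List Int := [3, 1, 4]

def Spec_MakeMaxMinList (loss_list : List Int) (out : List Int × List Int) : Prop := out = MakeMaxMinList_alt loss_list
instance (loss_list : List Int) (out : List Int × List Int) : Decidable (Spec_MakeMaxMinList loss_list out) := by unfold Spec_MakeMaxMinList; infer_instance

-- ===== CLAIM (what is proved, stated in full; the proofs are below) =====
def Claim_equal_MakeMaxMinList : Prop := ∀ (loss_list : List Int), Dom_MakeMaxMinList loss_list → Pre_MakeMaxMinList loss_list → Spec_MakeMaxMinList loss_list (MakeMaxMinList loss_list)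

-- ===== LEMMAS AND PROOFS =====

-- the common target: the two prefix scans
def prefixes (xs : List Int) : List Int × List Int :=
  match xs with
  | [] => ([], [])
  | h :: t => (List.scanl max h t, List.scanl min h t)

-- A's fold appends, to the accumulated lists, the tails of the scanl prefix scans from the current running extremes.
theorem mmFoldl_snd (t : List Int) : ∀ (m n : Int) (am an : List Int),
    (t.foldl mmStep (m, n, am, an)).2.2
      = (am ++ (List.scanl max m t).tail, an ++ (List.scanl min n t).tail) := by
  induction t with
  | nil => intro m n am an; simp
  | cons l t ih =>
    intro m n am an
    have hmax : (if l > m then l else m) = max m l := by omega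
    have hmin : (if l < n then l else n) = min n l := by omega
    simp only [List.foldl, mmStep, hmax, hmin, ih, List.scanl]
    simp only [Prod.mk.injEq]
    constructor <;> · cases t <;> simp

-- A = the two prefix scans
theorem MakeMaxMinList_eq_prefixes (h : Int) (t : List Int) :
    MakeMaxMinList (h :: t) = prefixes (h :: t) := by
  simp only [MakeMaxMinList, prefixes, PySem.List.pyGet?, PySem.List.pyIdx?]
  norm_num
  have hstep : mmStep (h, h, ([] : List Int), ([] : List Int)) h = (h, h, [h], [h]) := by
    simp [mmStep]
  rw [hstep, mmFoldl_snd t h h [h] [h]]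
  simp only [Prod.mk.injEq]
  constructor <;> · cases t <;> simp [List.scanl]

-- the k-th element of a prefix scan is the fold over the first k tail elements
theorem getElem_scanl_eq_foldl (f : Int → Int → Int) (t : List Int) :
    ∀ (h : Int) (k : Nat) (hk : k < t.length + 1),
      (List.scanl f h t)[k]'(by simp; omega) = (t.take k).foldl f h := by
  induction t with
  | nil =>
    intro h k hk
    have hk0 : k = 0 := by simp at hk; omega
    subst hk0
    simp [List.scanl]
  | cons a t ih =>
    intro h k hk
    cases k with
    | zero => simp [List.scanl]
    | succ k =>
      have : k < t.length + 1 := by simpa using hk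
      simp only [List.scanl_cons, List.getElem_cons_succ, List.take_succ_cons, List.foldl_cons]
      exact ih (f h a) k this

-- the last element of a prefix scan is the full fold
theorem getLast?_scanl (f : Int → Int → Int) (h : Int) (t : List Int) :
    (List.scanl f h t).getLast? = some (t.foldl f h) := by
  have hlen : (List.scanl f h t).length = t.length + 1 := by simp
  rw [List.getLast?_eq_getElem?, List.getElem?_eq_getElem (by omega)]
  have : (List.scanl f h t).length - 1 = t.length := by omega
  simp only [this]
  rw [getElem_scanl_eq_foldl f t h t.length (by omega), List.take_length]

-- mapping (f b ·) over a scan re-seeds the scan, for associative f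
theorem map_scanl_assoc (f : Int → Int → Int)
    (hassoc : ∀ a b c, f (f a b) c = f a (f b c)) (b : Int) :
    ∀ (a : Int) (s : List Int),
      (List.scanl f a s).map (fun v => f b v) = List.scanl f (f b a) s := by
  intro a s
  induction s generalizing a with
  | nil => simp [List.scanl]
  | cons x s ih =>
    simp only [List.scanl_cons, List.map_cons, ih (f a x)]
    rw [hassoc b a x]

-- a prefix scan over an append splits into the left scan followed by the capped right scan
theorem scanl_append_assoc (f : Int → Int → Int)
    (hassoc : ∀ a b c, f (f a b) c = f a (f b c)) (a : Int) (s : List Int) :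
    ∀ (h : Int) (t : List Int),
      List.scanl f h (t ++ a :: s)
        = List.scanl f h t ++ (List.scanl f a s).map (fun v => f (t.foldl f h) v) := by
  intro h t
  induction t generalizing h with
  | nil =>
    simp only [List.nil_append, List.scanl_cons, List.foldl_nil, List.scanl_nil,
      map_scanl_assoc f hassoc h a s]
    rfl
  | cons x t ih =>
    simp only [List.cons_append, List.scanl_cons, List.foldl_cons, ih (f h x)]

-- B = the two prefix scans, by strong induction on the length
theorem alt_eq_prefixes : ∀ (n : Nat) (xs : List Int), xs.length ≤ n →
    MakeMaxMinList_alt xs = prefixes xs := by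
  intro n
  induction n with
  | zero =>
    intro xs hlen
    have : xs = [] := List.length_eq_zero_iff.mp (by omega)
    subst this
    simp [MakeMaxMinList_alt, prefixes]
  | succ n ih =>
    intro xs hlen
    rw [MakeMaxMinList_alt]
    by_cases hle : xs.length ≤ 1
    · rw [dif_pos hle]
      match xs, hle with
      | [], _ => rfl
      | [x], _ => simp [prefixes, List.scanl]
    · rw [dif_neg hle]
      have hlen2 : 2 ≤ xs.length := by omega
      have hm1 : 1 ≤ xs.length / 2 := by omega
      have hmlt : xs.length / 2 < xs.length := by omega
      simp only [PySem.List.slice_to_natCast, PySem.List.slice_from_natCast]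
      have htake : (xs.take (xs.length / 2)).length = xs.length / 2 := by
        simp; omega
      have hdrop : (xs.drop (xs.length / 2)).length = xs.length - xs.length / 2 := by simp
      rw [ih (xs.take (xs.length / 2)) (by omega), ih (xs.drop (xs.length / 2)) (by omega)]
      obtain ⟨h, t, hht⟩ : ∃ h t, xs.take (xs.length / 2) = h :: t := by
        cases hc : xs.take (xs.length / 2) with
        | nil => rw [hc] at htake; simp at htake; omega
        | cons h t => exact ⟨h, t, rfl⟩
      obtain ⟨a, s, has⟩ : ∃ a s, xs.drop (xs.length / 2) = a :: s := by
        cases hc : xs.drop (xs.length / 2) with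
        | nil => rw [hc] at hdrop; simp at hdrop; omega
        | cons a s => exact ⟨a, s, rfl⟩
      have hxs : xs = h :: (t ++ a :: s) := by
        rw [← List.take_append_drop (xs.length / 2) xs, hht, has]; rfl
      rw [hht, has, hxs]
      simp only [prefixes, PySem.List.pyGet?_neg_one, getLast?_scanl, Option.getD_some]
      have hmx : ∀ v : Int, (if v > t.foldl max h then v else t.foldl max h)
          = max (t.foldl max h) v := fun v => by omega
      have hmn : ∀ v : Int, (if v < t.foldl min h then v else t.foldl min h)
          = min (t.foldl min h) v := fun v => by omega
      simp only [hmx, hmn]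
      rw [scanl_append_assoc max (fun a b c => max_assoc a b c) a s h t,
        scanl_append_assoc min (fun a b c => min_assoc a b c) a s h t]

-- ===== VERDICT (by name: the statement is the Claim_ definition above) =====
theorem MakeMaxMinList_spec : Claim_equal_MakeMaxMinList := by
  intro loss_list _ hpre
  match loss_list with
  | [] => exact absurd rfl hpre
  | h :: t =>
    show MakeMaxMinList (h :: t) = MakeMaxMinList_alt (h :: t)
    rw [MakeMaxMinList_eq_prefixes, alt_eq_prefixes (h :: t).length (h :: t) le_rfl]
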